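-- pv_equiv track=rewrite | github.com/Edwix01/Epolaris_App2024 | Simulación/epopsSimulacion/con_red.py | id_red
-- ===== SOURCE A (Python) =====
-- def id_red(con):
--     # Crear una nueva lista para almacenar las conexiones modificadas
--     conm = []
--     # Iterar sobre cada tupla de conexiones
--     for tupla in con:
--         # Crear una nueva tupla con las direcciones IP modificadas
--         tupla_modificada = tuple(direccion.split("-")[0] for direccion in tupla)
--         conm.append(tupla_modificada)
--
--     # Convertir cada tupla en un conjunto para ignorar el orden
--     lista = [sorted(tupla) for tupla in conm]
--     conexredun  = {}
--     conexredu1  = {}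
--
--
--     for i in lista:
--         a = lista.count(i)
--         if a >= 2:
--            conexredun[str(i)] = ""
--         if a <= 1:
--            conexredu1[str(i)] = ""
--
--     return list(conexredun.keys()),list(conexredu1.keys())
-- ===== SOURCE B (Python) =====
-- def id_red(con):
--     # Peel loop: normalize once, then repeatedly take the first remaining key and
--     # partition out ALL of its occurrences; the number removed classifies the key.
--     # No dicts, no sets, no per-element counting pass; first-seen order is the
--     # peeling order itself.
--     keys = [str(sorted(d.split("-")[0] for d in t)) for t in con]
--     result1, result2 = [], []
--     while keys:
--         k = keys[0]
--         others = [x for x in keys if x != k]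
--         if len(keys) - len(others) >= 2:
--             result1.append(k)
--         else:
--             result2.append(k)
--         keys = others
--     return result1, result2
-- ===== Notes on version B (the rewrite author's own statement) =====
-- stated objective: alternative
-- what changed: B replaces A's per-element whole-list count and two conditional dict-insert passes by a peel loop: repeatedly take the first remaining normalized key, partition out all of its occurrences, and classify it by how many elements were removed; no dict, no set and no counting scan remain, and first-seen order is the peeling order itself.
import Mathlib
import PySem

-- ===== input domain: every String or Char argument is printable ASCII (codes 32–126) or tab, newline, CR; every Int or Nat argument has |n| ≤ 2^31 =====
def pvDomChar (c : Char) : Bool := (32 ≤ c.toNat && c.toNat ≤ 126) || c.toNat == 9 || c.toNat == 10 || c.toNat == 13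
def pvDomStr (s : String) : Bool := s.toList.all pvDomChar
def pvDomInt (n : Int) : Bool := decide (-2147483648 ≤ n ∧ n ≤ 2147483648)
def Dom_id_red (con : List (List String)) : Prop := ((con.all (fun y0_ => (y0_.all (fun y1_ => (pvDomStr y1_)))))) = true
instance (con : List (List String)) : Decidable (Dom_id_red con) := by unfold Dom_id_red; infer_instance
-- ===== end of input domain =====

-- B replaces A's per-element whole-list count and two conditional dict-insert passes
-- by a peel loop: take the first remaining normalized key, partition out all of its
-- occurrences, and classify it by how many elements the partition removed.

-- Shared primitives: both Pythons evaluate `str(sorted(...))` on a list of str and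
-- `direccion.split("-")[0]`. PySem has no str()/repr() of a list, so Python's
-- str(list_of_str) is ported by hand below; it is exact on the input domain
-- (printable ASCII plus tab/newline/CR, which CPython's repr renders as \t, \n, \r).

-- repr() escape of one character under quote q
def pyEscChar (q c : Char) : List Char :=
  if c = '\\' then ['\\', '\\']
  else if c = q then ['\\', q]
  else if c = '\t' then ['\\', 't']
  else if c = '\n' then ['\\', 'n']
  else if c = '\r' then ['\\', 'r']
  else [c]

-- repr() quote choice: single quote unless the string has ' and no "
def pyQuote (s : List Char) : Char :=
  if s.contains '\'' && !s.contains '"' then '"' else '\''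

-- repr(s) of a Python str s
def pyReprChars (s : List Char) : List Char :=
  pyQuote s :: s.flatMap (pyEscChar (pyQuote s)) ++ [pyQuote s]

-- ", ".join(repr(x) for x in xs)
def pyStrBody : List (List Char) → List Char
  | [] => []
  | [x] => pyReprChars x
  | x :: y :: xs => pyReprChars x ++ ',' :: ' ' :: pyStrBody (y :: xs)

-- str(ls) of a Python list of str
def pyStrList (ls : List String) : String :=
  String.ofList ('[' :: pyStrBody (ls.map String.toList) ++ [']'])

-- direccion.split("-")[0]  (split? is some since "-" ≠ ""; a split result is never
-- empty, so the Python [0] cannot raise and pyGetD's default is unreachable)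
def pyFirst (d : String) : String :=
  PySem.List.pyGetD ((PySem.Str.split? d "-").getD []) 0 ""

-- ===== PORT A =====
def id_red (con : List (List String)) : List String × List String :=
  let conm := con.foldl (fun acc tupla => acc ++ [tupla.map pyFirst]) ([] : List (List String))
  let lista := conm.map (fun tupla => PySem.List.sorted tupla (fun x => x.toList) false)
  let p := lista.foldl
    (fun (p : PySem.Dict String String × PySem.Dict String String) i =>
      let a := PySem.List.count lista i
      let p1 := if 2 ≤ a then p.1.insert (pyStrList i) "" else p.1
      let p2 := if a ≤ 1 then p.2.insert (pyStrList i) "" else p.2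
      (p1, p2))
    (PySem.Dict.empty, PySem.Dict.empty)
  (p.1.keys, p.2.keys)

-- ===== PORT B =====
-- the while loop of Source B: peel the first key and all its occurrences, classify it
def idRedLoop : List String → List String → List String → List String × List String
  | [], result1, result2 => (result1, result2)
  | k :: rest, result1, result2 =>
    let others := (k :: rest).filter (fun x => !(x == k))
    if 2 ≤ ((k :: rest).length : Int) - (others.length : Int) then
      idRedLoop others (result1 ++ [k]) result2
    else
      idRedLoop others result1 (result2 ++ [k])
termination_by ks _ _ => ks.length
decreasing_by
  all_goals
    simpa [List.filter_cons] using
      Nat.lt_succ_of_le (List.length_filter_le _ rest)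

def id_red_alt (con : List (List String)) : List String × List String :=
  let keys := con.map
    (fun t => pyStrList (PySem.List.sorted (t.map pyFirst) (fun x => x.toList) false))
  idRedLoop keys [] []

-- ===== PRECONDITION & SPEC =====
def Spec_id_red (con : List (List String)) (out : List String × List String) : Prop := out = id_red_alt con
instance (con : List (List String)) (out : List String × List String) : Decidable (Spec_id_red con out) := by unfold Spec_id_red; infer_instance

-- ===== CLAIM (what is proved, stated in full; the proofs are below) =====
def Claim_equal_id_red : Prop := ∀ (con : List (List String)), Dom_id_red con → Spec_id_red con (id_red con)

-- ===== LEMMAS AND PROOFS =====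

-- the normalized (split + sorted) form of one connection; its key string is pyStrList
def pvNorm (tupla : List String) : List String :=
  PySem.List.sorted (tupla.map pyFirst) (fun x => x.toList) false

-- both programs key a connection on the STRING str(sorted(...)); they agree because
-- that string determines the normalized list: we prove pyStrList injective by
-- exhibiting a decoder (parseBody below) that inverts the escape in pyReprChars.
def pyUnesc (d : Char) : Char :=
  if d = 't' then '\t' else if d = 'n' then '\n' else if d = 'r' then '\r' else d

def parseBody (q : Char) : List Char → Option (List Char × List Char)
  | [] => none
  | c :: cs =>
    if c = q then some ([], cs)
    else if c = '\\' then
      match cs with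
      | [] => none
      | d :: ds => (parseBody q ds).map (fun r => (pyUnesc d :: r.1, r.2))
    else (parseBody q cs).map (fun r => (c :: r.1, r.2))

lemma pyQuote_cases (s : List Char) : pyQuote s = '\'' ∨ pyQuote s = '"' := by
  unfold pyQuote; split <;> simp

lemma parseBody_roundtrip (q : Char) (hq : q = '\'' ∨ q = '"') (s rest : List Char) :
    parseBody q (s.flatMap (pyEscChar q) ++ q :: rest) = some (s, rest) := by
  have hqb : ('\\' : Char) ≠ q := by rcases hq with h | h <;> subst h <;> decide
  have huq : pyUnesc q = q := by rcases hq with h | h <;> subst h <;> decide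
  induction s with
  | nil => rw [parseBody.eq_def]; simp
  | cons c s ih =>
    simp only [List.flatMap_cons, List.append_assoc]
    by_cases h1 : c = '\\'
    · subst h1
      simp [pyEscChar, parseBody, hqb, ih, pyUnesc]
    · by_cases h2 : c = q
      · subst h2
        simp [pyEscChar, hqb.symm, parseBody, hqb, ih, huq]
      · by_cases h3 : c = '\t'
        · subst h3
          have : ('\t' : Char) ≠ q := by rcases hq with h | h <;> subst h <;> decide
          simp [pyEscChar, h1, this, parseBody, hqb, ih, pyUnesc]
        · by_cases h4 : c = '\n'
          · subst h4
            have : ('\n' : Char) ≠ q := by rcases hq with h | h <;> subst h <;> decide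
            simp [pyEscChar, h1, this, parseBody, hqb, ih, pyUnesc]
          · by_cases h5 : c = '\r'
            · subst h5
              have : ('\r' : Char) ≠ q := by rcases hq with h | h <;> subst h <;> decide
              simp [pyEscChar, h1, this, parseBody, hqb, ih, pyUnesc]
            · have he : pyEscChar q c = [c] := by simp [pyEscChar, h1, h2, h3, h4, h5]
              rw [he, List.cons_append, parseBody.eq_def]
              simp [h1, h2, ih]

lemma pyRepr_prefix_inj {x y a b : List Char}
    (h : pyReprChars x ++ a = pyReprChars y ++ b) : x = y ∧ a = b := by
  have h' : pyQuote x :: (x.flatMap (pyEscChar (pyQuote x)) ++ pyQuote x :: a)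
      = pyQuote y :: (y.flatMap (pyEscChar (pyQuote y)) ++ pyQuote y :: b) := by
    simpa [pyReprChars, List.append_assoc] using h
  obtain ⟨hq, ht⟩ := List.cons_eq_cons.mp h'
  have r1 := parseBody_roundtrip (pyQuote x) (pyQuote_cases x) x a
  have r2 := parseBody_roundtrip (pyQuote y) (pyQuote_cases y) y b
  rw [hq] at ht
  rw [hq, ht, r2] at r1
  obtain ⟨h1, h2⟩ := (by simpa using r1 : y = x ∧ b = a)
  exact ⟨h1.symm, h2.symm⟩

lemma pyStrBody_cons (x : List Char) (xs : List (List Char)) :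
    pyStrBody (x :: xs) = pyReprChars x ++ (if xs.isEmpty then [] else ',' :: ' ' :: pyStrBody xs) := by
  cases xs <;> simp [pyStrBody]

lemma pyStrBody_inj : ∀ xs ys : List (List Char),
    pyStrBody xs ++ [']'] = pyStrBody ys ++ [']'] → xs = ys := by
  intro xs
  induction xs with
  | nil =>
    intro ys h
    cases ys with
    | nil => rfl
    | cons y ys =>
      exfalso
      rw [pyStrBody_cons] at h
      simp only [pyStrBody, List.nil_append, pyReprChars, List.cons_append,
        List.append_assoc] at h
      obtain ⟨hq, -⟩ := List.cons_eq_cons.mp h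
      rcases pyQuote_cases y with hh | hh <;> rw [hh] at hq <;> exact absurd hq (by decide)
  | cons x xs ih =>
    intro ys h
    cases ys with
    | nil =>
      exfalso
      rw [pyStrBody_cons] at h
      simp only [pyStrBody, List.nil_append, pyReprChars, List.cons_append,
        List.append_assoc] at h
      obtain ⟨hq, -⟩ := List.cons_eq_cons.mp h.symm
      rcases pyQuote_cases x with hh | hh <;> rw [hh] at hq <;> exact absurd hq (by decide)
    | cons y ys =>
      rw [pyStrBody_cons, pyStrBody_cons] at h
      rw [List.append_assoc, List.append_assoc] at h
      obtain ⟨hxy, ht⟩ := pyRepr_prefix_inj h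
      subst hxy
      cases xs with
      | nil =>
        cases ys with
        | nil => rfl
        | cons y2 ys2 => simp at ht
      | cons x2 xs2 =>
        cases ys with
        | nil => simp at ht
        | cons y2 ys2 =>
          simp only [List.isEmpty_cons] at ht
          obtain ⟨-, ht⟩ := List.cons_eq_cons.mp ht
          obtain ⟨-, ht⟩ := List.cons_eq_cons.mp ht
          rw [ih (y2 :: ys2) ht]

lemma pyStrList_inj : Function.Injective pyStrList := by
  intro xs ys h
  unfold pyStrList at h
  have h' := congrArg String.toList h
  simp only [String.toList_ofList] at h'
  obtain ⟨-, h2⟩ := List.cons_eq_cons.mp h'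
  exact List.map_injective_iff.mpr (fun a b hh => String.toList_inj.mp hh)
    (pyStrBody_inj _ _ h2)

-- A's classification loop, with the two dicts split into two plain insert folds
lemma foldl_pair_split {α : Type} (l : List α) (c : α → Nat) (k : α → String)
    (d1 d2 : PySem.Dict String String) :
    l.foldl (fun p i =>
        (if 2 ≤ c i then p.1.insert (k i) "" else p.1,
         if c i ≤ 1 then p.2.insert (k i) "" else p.2)) (d1, d2)
    = ((l.filter (fun i => decide (2 ≤ c i))).foldl (fun d i => d.insert (k i) "") d1,
       (l.filter (fun i => decide (c i ≤ 1))).foldl (fun d i => d.insert (k i) "") d2) := by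
  induction l generalizing d1 d2 with
  | nil => rfl
  | cons x t ih =>
    simp only [List.foldl_cons, List.filter_cons]
    by_cases h2 : 2 ≤ c x <;> by_cases h1 : c x ≤ 1 <;> simp [h2, h1, ih]

-- characterization of A: its two outputs are the distinct keys of the normalized
-- connections that occur at least twice, resp. exactly once, in first-seen order
lemma id_red_eq (con : List (List String)) :
    id_red con =
      (PySem.Set.ofList (((con.map pvNorm).filter
          (fun i => decide (2 ≤ (con.map pvNorm).count i))).map pyStrList),
       PySem.Set.ofList (((con.map pvNorm).filter
          (fun i => decide ((con.map pvNorm).count i ≤ 1))).map pyStrList)) := by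
  simp only [id_red]
  have hl : ∀ l : List (List String),
      List.map (fun tupla => PySem.List.sorted tupla (fun x => x.toList) false)
        (List.foldl (fun acc tupla => acc ++ [List.map pyFirst tupla]) [] l)
      = List.map pvNorm l := by
    intro l
    rw [PySem.List.foldl_append_singleton_eq_map]
    simp only [List.nil_append, List.map_map]
    rfl
  rw [hl con, foldl_pair_split (con.map pvNorm) (fun i => PySem.List.count (con.map pvNorm) i) pyStrList,
    PySem.Dict.keys_foldl_insert_key _ pyStrList (fun _ _ => "") _,
    PySem.Dict.keys_foldl_insert_key _ pyStrList (fun _ _ => "") _]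
  simp [PySem.Set.update_nil_left, PySem.List.count_eq]
  exact ⟨rfl, rfl⟩

-- set(xs) commutes with filtering
lemma ofList_filter {α : Type} [BEq α] [LawfulBEq α] (m : List α) (q : α → Bool) :
    PySem.Set.ofList (m.filter q) = (PySem.Set.ofList m).filter q := by
  induction m using List.reverseRecOn with
  | nil => rfl
  | append_singleton t x ih =>
    rw [List.filter_append, PySem.Set.ofList_append_singleton]
    cases hq : q x
    · simp only [List.filter_singleton, hq, List.append_nil, ih, cond_false]
      by_cases hm : x ∈ PySem.Set.ofList t
      · rw [PySem.Set.add_of_mem hm]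
      · rw [PySem.Set.add_of_not_mem hm, List.filter_append]
        simp [hq]
    · simp only [List.filter_singleton, hq, cond_true, PySem.Set.ofList_append_singleton, ih]
      by_cases hm : x ∈ PySem.Set.ofList t
      · rw [PySem.Set.add_of_mem hm,
          PySem.Set.add_of_mem (by simpa [List.mem_filter, hq] using hm)]
      · rw [PySem.Set.add_of_not_mem hm,
          PySem.Set.add_of_not_mem (by simpa [List.mem_filter, hq] using hm),
          List.filter_append]
        simp [hq]

-- the bridge between the two characterizations, for an injective key map
lemma bridge {α : Type} [BEq α] [LawfulBEq α] (l : List α) (f : α → String)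
    (hf : Function.Injective f) (p : Nat → Bool) :
    PySem.Set.ofList ((l.filter (fun i => p (l.count i))).map f)
      = (PySem.Set.ofList (l.map f)).filter (fun y => p ((l.map f).count y)) := by
  rw [← ofList_filter, List.filter_map]
  congr 2
  apply List.filter_congr
  intro x hx
  simp [List.count_map_of_injective l f hf x]

-- peeling the head key off set(ks): first occurrences of the rest are unchanged
lemma ofList_cons_peel {α : Type} [BEq α] [LawfulBEq α] (k : α) (l : List α) :
    PySem.Set.ofList (k :: l) = k :: PySem.Set.ofList (l.filter (fun x => !(x == k))) := by
  induction l using List.reverseRecOn with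
  | nil => rfl
  | append_singleton t x ih =>
    rw [show k :: (t ++ [x]) = (k :: t) ++ [x] from rfl,
      PySem.Set.ofList_append_singleton, ih]
    by_cases hx : x = k
    · rw [PySem.Set.add_of_mem (by simp [hx])]
      simp [List.filter_append, hx]
    · rw [List.filter_append, List.filter_singleton,
        show (!(x == k)) = true by simpa using hx, cond_true,
        PySem.Set.ofList_append_singleton]
      by_cases hm : x ∈ PySem.Set.ofList (t.filter (fun y => !(y == k)))
      · rw [PySem.Set.add_of_mem (List.mem_cons_of_mem _ hm), PySem.Set.add_of_mem hm]
      · rw [PySem.Set.add_of_not_mem (by simp [hm, hx]), PySem.Set.add_of_not_mem hm]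
        rfl

-- peeling removes exactly count-of-k many elements
lemma length_sub_filter_ne {α : Type} [BEq α] [LawfulBEq α] (k : α) : ∀ (l : List α),
    l.length - (l.filter (fun x => !(x == k))).length = l.count k := by
  intro l
  induction l with
  | nil => rfl
  | cons y t iht =>
    have hle := List.length_filter_le (fun x => !(x == k)) t
    by_cases hy : y = k
    · subst hy
      rw [List.filter_cons, if_neg (by simp), List.count_cons_self, List.length_cons]
      omega
    · rw [List.filter_cons, if_pos (by simpa using hy), List.count_cons_of_ne hy,
        List.length_cons, List.length_cons]
      omega

-- B's peel loop computes, onto the accumulators, exactly the distinct keys that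
-- occur at least twice resp. at most once, in first-occurrence order
lemma idRedLoop_eq (n : Nat) : ∀ (ks : List String), ks.length ≤ n →
    ∀ (r1 r2 : List String),
    idRedLoop ks r1 r2 =
      (r1 ++ (PySem.Set.ofList ks).filter (fun x => decide (2 ≤ ks.count x)),
       r2 ++ (PySem.Set.ofList ks).filter (fun x => decide (ks.count x ≤ 1))) := by
  induction n with
  | zero =>
    intro ks hks r1 r2
    rw [List.length_eq_zero_iff.mp (Nat.le_zero.mp hks)]
    simp [idRedLoop]
  | succ n ih =>
    intro ks hks r1 r2
    cases ks with
    | nil => simp [idRedLoop]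
    | cons k rest =>
      rw [idRedLoop]
      have hfk : ((k :: rest).filter (fun x => !(x == k))) = rest.filter (fun x => !(x == k)) := by
        simp
      have hle := List.length_filter_le (fun x => !(x == k)) rest
      have hlen : (rest.filter (fun x => !(x == k))).length ≤ n := by
        simp only [List.length_cons] at hks
        omega
      have hcount := length_sub_filter_ne k rest
      have hcond : (2 ≤ ((k :: rest).length : Int)
            - (((k :: rest).filter (fun x => !(x == k))).length : Int))
          ↔ (2 ≤ (k :: rest).count k) := by
        rw [hfk, List.length_cons, List.count_cons_self]
        omega
      have hpeel : PySem.Set.ofList (k :: rest)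
          = k :: PySem.Set.ofList (rest.filter (fun x => !(x == k))) :=
        ofList_cons_peel k rest
      have hsur : ∀ x ∈ PySem.Set.ofList (rest.filter (fun x => !(x == k))),
          (rest.filter (fun x => !(x == k))).count x = (k :: rest).count x := by
        intro x hx
        have hxo : x ∈ rest.filter (fun x => !(x == k)) := (PySem.Set.mem_ofList _ _).mp hx
        have hxk : ¬ (x = k) := by
          rcases List.mem_filter.mp hxo with ⟨-, hb⟩
          simpa using hb
        rw [List.count_cons_of_ne (Ne.symm hxk), List.count_filter (by simpa using hxk)]
      by_cases hc : 2 ≤ (k :: rest).count k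
      · rw [if_pos (hcond.mpr hc), hfk, ih _ hlen (r1 ++ [k]) r2, hpeel]
        simp only [List.filter_cons, decide_eq_true_eq]
        rw [if_pos hc, if_neg (by omega)]
        refine Prod.ext ?_ ?_ <;> simp only
        · rw [List.append_assoc, List.singleton_append]
          congr 2
          exact List.filter_congr (fun x hx => by rw [hsur x hx])
        · congr 1
          exact List.filter_congr (fun x hx => by rw [hsur x hx])
      · rw [if_neg ((not_iff_not.mpr hcond).mpr hc), hfk, ih _ hlen r1 (r2 ++ [k]), hpeel]
        simp only [List.filter_cons, decide_eq_true_eq]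
        rw [if_neg hc, if_pos (by omega)]
        refine Prod.ext ?_ ?_ <;> simp only
        · congr 1
          exact List.filter_congr (fun x hx => by rw [hsur x hx])
        · rw [List.append_assoc, List.singleton_append]
          congr 2
          exact List.filter_congr (fun x hx => by rw [hsur x hx])

-- characterization of B in the same terms (counts of the key strings)
lemma id_red_alt_eq (con : List (List String)) :
    id_red_alt con =
      ((PySem.Set.ofList ((con.map pvNorm).map pyStrList)).filter
          (fun x => decide (2 ≤ ((con.map pvNorm).map pyStrList).count x)),
       (PySem.Set.ofList ((con.map pvNorm).map pyStrList)).filter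
          (fun x => decide (((con.map pvNorm).map pyStrList).count x ≤ 1))) := by
  have hkeys : con.map
      (fun t => pyStrList (PySem.List.sorted (t.map pyFirst) (fun x => x.toList) false))
      = (con.map pvNorm).map pyStrList := by
    rw [List.map_map]; rfl
  simp only [id_red_alt, hkeys]
  rw [idRedLoop_eq ((con.map pvNorm).map pyStrList).length _ le_rfl]
  simp

-- ===== VERDICT (by name: the statement is the Claim_ definition above) =====
theorem id_red_spec : Claim_equal_id_red := by
  intro con _
  unfold Spec_id_red
  rw [id_red_eq, id_red_alt_eq]
  exact Prod.ext
    (bridge (con.map pvNorm) pyStrList pyStrList_inj (fun c => decide (2 ≤ c)))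
    (bridge (con.map pvNorm) pyStrList pyStrList_inj (fun c => decide (c ≤ 1)))
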